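-- pv_equiv track=rewrite | github.com/Pablomgom/F1_Data | src/utils/utils.py | find_nearest_non_repeating
-- ===== SOURCE A (Python) =====
-- def find_nearest_non_repeating(array1, array2):
--     used_indices = set()  # To keep track of used indices from array2
--     nearest_values = []  # To store the nearest values for each element in array1
--
--     for value in array1:
--         nearest = None
--         nearest_dist = float('inf')
--
--         for i, value2 in enumerate(array2):
--             if i not in used_indices:
--                 dist = abs(value - value2)
--                 if dist < nearest_dist:
--                     nearest_dist = dist
--                     nearest = value2
--                     nearest_index = i
--
--         nearest_values.append(nearest)
--         used_indices.add(nearest_index)  # Mark this index as used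
--
--     return nearest_values
-- ===== SOURCE B (Python) =====
-- import bisect
--
-- def find_nearest_non_repeating(array1, array2):
--     # sorted pool of (value, original_index); nearest lookup by binary search
--     rem = sorted((v, i) for i, v in enumerate(array2))
--     out = []
--     for x in array1:
--         p = bisect.bisect_left(rem, (x,))
--         if p == len(rem):
--             # everything is below x: best value is the largest; take the
--             # first entry of its run (lowest original index)
--             pos = bisect.bisect_left(rem, (rem[p - 1][0],))
--         elif p == 0:
--             pos = 0
--         else:
--             vs, js = rem[p]
--             q = bisect.bisect_left(rem, (rem[p - 1][0],))
--             vp, jp = rem[q]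
--             pos = q if (x - vp, jp) < (vs - x, js) else p
--         out.append(rem[pos][0])
--         rem.pop(pos)
--     return out
-- ===== Notes on version B (the rewrite author's own statement) =====
-- stated objective: faster
-- what changed: Replaces A's per-element linear rescan of all of array2 with a used-index set by sorting array2's (value,index) pairs once and serving each query with bisect binary searches for the nearest remaining value (lowest-index tie-break via the run-start of the predecessor value) plus a pop from the sorted pool.
-- outside the precondition, e.g. on find_nearest_non_repeating([0, 1], [5]): A returns [5, None], B raises IndexError; on find_nearest_non_repeating([3], []): A raises UnboundLocalError, B raises IndexError
import Mathlib
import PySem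

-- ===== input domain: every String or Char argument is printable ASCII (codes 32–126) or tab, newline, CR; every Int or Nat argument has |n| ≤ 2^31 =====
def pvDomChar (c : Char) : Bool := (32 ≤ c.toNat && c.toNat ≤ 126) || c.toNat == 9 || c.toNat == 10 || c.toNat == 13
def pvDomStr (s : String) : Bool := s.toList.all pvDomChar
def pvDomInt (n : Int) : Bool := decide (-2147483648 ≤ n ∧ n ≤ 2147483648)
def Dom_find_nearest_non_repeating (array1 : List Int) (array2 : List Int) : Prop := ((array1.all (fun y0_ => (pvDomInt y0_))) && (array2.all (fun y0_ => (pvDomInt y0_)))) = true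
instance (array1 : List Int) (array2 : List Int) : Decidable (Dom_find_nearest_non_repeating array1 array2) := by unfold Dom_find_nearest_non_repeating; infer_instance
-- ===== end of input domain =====

-- B replaces A's per-element rescan of all of array2 (with a used-index set) by one sort of the
-- (value, index) pairs plus a per-element binary search for the nearest remaining value
-- (lowest-index tie-break) and deletion from the sorted pool.

-- ===== PORT A =====
-- the body of A's inner 'for i, value2 in enumerate(array2)' loop;
-- state = (nearest, nearest_dist, nearest_index), none = Python's None / float('inf') / unset
def fnrScan (value : Int) (s : Option Int × Option Int × Option Int) (iv : Int × Int) :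
    Option Int × Option Int × Option Int :=
  let dist := |value - iv.2|
  match s.2.1 with
  | none => (some iv.2, some dist, some iv.1)   -- dist < inf
  | some nd => if dist < nd then (some iv.2, some dist, some iv.1) else s

-- the body of A's outer 'for value in array1' loop; state = (used_indices, nearest_values)
def fnrStepA (array2 : List Int) (st : PySem.Set Int × List Int) (value : Int) :
    PySem.Set Int × List Int :=
  let used := st.1
  let inner := (PySem.List.enumerate array2).foldl
    (fun s iv => if !(PySem.Set.contains used iv.1) then fnrScan value s iv else s)
    (none, none, none)
  -- under Pre_ the inner loop always finds an unused index, so the getD defaults are never taken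
  (PySem.Set.add used (inner.2.2.getD 0), st.2 ++ [inner.1.getD 0])

def find_nearest_non_repeating (array1 : List Int) (array2 : List Int) : List Int :=
  (array1.foldl (fnrStepA array2) (PySem.Set.empty, [])).2

-- ===== PORT B =====
-- bisect.bisect_left(rem, (x,)) on a lexicographically sorted pair list compares by value only
def fnrBisect (rem : List (Int × Int)) (x : Int) : Nat :=
  PySem.List.bisectLeft (rem.map (fun p => p.1)) x

-- the pool position chosen for query x (B's if/elif/else)
def fnrChoose (rem : List (Int × Int)) (x : Int) : Nat :=
  let p := fnrBisect rem x
  if p = rem.length then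
    fnrBisect rem (rem.getD (p - 1) (0, 0)).1
  else if p = 0 then
    0
  else
    let s := rem.getD p (0, 0)
    let q := fnrBisect rem (rem.getD (p - 1) (0, 0)).1
    let pr := rem.getD q (0, 0)
    if x - pr.1 < s.1 - x ∨ (x - pr.1 = s.1 - x ∧ pr.2 < s.2) then q else p

-- the body of B's 'for x in array1' loop; state = (rem, out); rem.pop(pos) = eraseIdx pos
def fnrStepB (st : List (Int × Int) × List Int) (x : Int) : List (Int × Int) × List Int :=
  let pos := fnrChoose st.1 x
  (st.1.eraseIdx pos, st.2 ++ [(st.1.getD pos (0, 0)).1])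

def find_nearest_non_repeating_alt (array1 : List Int) (array2 : List Int) : List Int :=
  -- sorted((v, i) for i, v in enumerate(array2)): the indices are strictly increasing, so
  -- Python's lexicographic sort of these pairs is the stable sort by value
  let rem0 := PySem.List.sorted ((PySem.List.enumerate array2).map (fun p => (p.2, p.1)))
    (fun p => p.1) false
  (array1.foldl fnrStepB (rem0, [])).2

-- ===== PRECONDITION & SPEC =====
-- Pre_ excludes array1 longer than array2: there A pads the result with None (not an integer)
-- once array2's indices are exhausted, and raises UnboundLocalError when array2 is empty; B raises IndexError.
def Pre_find_nearest_non_repeating (array1 : List Int) (array2 : List Int) : Prop :=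
  array1.length ≤ array2.length
instance (array1 : List Int) (array2 : List Int) : Decidable (Pre_find_nearest_non_repeating array1 array2) := by unfold Pre_find_nearest_non_repeating; infer_instance

def pvWitness_find_nearest_non_repeating : List Int × List Int := ([4, -1], [2, 7, 2])

def Spec_find_nearest_non_repeating (array1 : List Int) (array2 : List Int) (out : List Int) : Prop := out = find_nearest_non_repeating_alt array1 array2
instance (array1 : List Int) (array2 : List Int) (out : List Int) : Decidable (Spec_find_nearest_non_repeating array1 array2 out) := by unfold Spec_find_nearest_non_repeating; infer_instance

-- ===== CLAIM (what is proved, stated in full; the proofs are below) =====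
def Claim_equal_find_nearest_non_repeating : Prop := ∀ (array1 : List Int) (array2 : List Int), Dom_find_nearest_non_repeating array1 array2 → Pre_find_nearest_non_repeating array1 array2 → Spec_find_nearest_non_repeating array1 array2 (find_nearest_non_repeating array1 array2)

-- ===== LEMMAS AND PROOFS =====

-- strict lexicographic order on (value, index) pairs: Python's tuple '<'
def fnrLex (a b : Int × Int) : Prop := a.1 < b.1 ∨ (a.1 = b.1 ∧ a.2 < b.2)

-- "a is at least as good an answer as b for query x": smaller distance,
-- or equal distance and an index not larger
def fnrKeyLe (x : Int) (a b : Int × Int) : Prop :=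
  |x - a.1| < |x - b.1| ∨ (|x - a.1| = |x - b.1| ∧ a.2 ≤ b.2)

theorem fnrKeyLe_trans {x : Int} {a b c : Int × Int}
    (h1 : fnrKeyLe x a b) (h2 : fnrKeyLe x b c) : fnrKeyLe x a c := by
  unfold fnrKeyLe at *; omega

theorem fnrLex_pairwise_getElem {l : List (Int × Int)} (h : l.Pairwise fnrLex)
    {i j : Nat} (hij : i < j) (hj : j < l.length) : fnrLex (l[i]'(by omega)) l[j] :=
  List.pairwise_iff_getElem.mp h i j (by omega) hj hij

theorem fnrLex_fst_mono {l : List (Int × Int)} (h : l.Pairwise fnrLex)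
    {i j : Nat} (hij : i ≤ j) (hj : j < l.length) : (l[i]'(by omega)).1 ≤ l[j].1 := by
  rcases Nat.lt_or_ge i j with hlt | hge
  · have := fnrLex_pairwise_getElem h hlt hj
    unfold fnrLex at this; omega
  · have : i = j := by omega
    subst this; omega

theorem fnrBisect_spec (rem : List (Int × Int)) (x : Int) (hsort : rem.Pairwise fnrLex) :
    fnrBisect rem x ≤ rem.length ∧
      (∀ j (hj : j < rem.length), j < fnrBisect rem x → rem[j].1 < x) ∧
      (∀ j (hj : j < rem.length), fnrBisect rem x ≤ j → x ≤ rem[j].1) := by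
  have hmap : (rem.map (fun p => p.1)).Pairwise (fun a b => a ≤ b) :=
    List.Pairwise.map _ (fun a b h => by unfold fnrLex at h; omega) hsort
  have h := PySem.List.bisectLeft_spec (rem.map (fun p => p.1)) x hmap
  unfold fnrBisect
  refine ⟨by simpa using h.1, ?_, ?_⟩
  · intro j hj hlt
    have := h.2.1 j (by simpa using hj) hlt
    simpa using this
  · intro j hj hge
    have := h.2.2 j (by simpa using hj) hge
    simpa using this

-- the "predecessor run" candidate: when all positions j < p hold values below x,
-- re-bisecting at the value of position p-1 yields the best pair among those positions
theorem fnrPredMin (rem : List (Int × Int)) (x : Int) (hsort : rem.Pairwise fnrLex)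
    (p : Nat) (hp0 : 0 < p) (hple : p ≤ rem.length)
    (hbelow : ∀ j (hj : j < rem.length), j < p → rem[j].1 < x) :
    fnrBisect rem ((rem.getD (p - 1) (0, 0)).1) ≤ p - 1 ∧
    ∀ j (hj : j < rem.length), j < p →
      fnrKeyLe x (rem.getD (fnrBisect rem ((rem.getD (p - 1) (0, 0)).1)) (0, 0)) rem[j] := by
  have hK : p - 1 < rem.length := by omega
  have hg1 : rem.getD (p - 1) (0, 0) = rem[p - 1] := List.getD_eq_getElem _ _ hK
  rw [hg1]
  obtain ⟨hqle, hqlt, hqge⟩ := fnrBisect_spec rem (rem[p - 1]'hK).1 hsort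
  set q := fnrBisect rem (rem[p - 1]'hK).1 with hqdef
  have hqK : q ≤ p - 1 := by
    by_contra h
    exact absurd (hqlt (p - 1) hK (by omega)) (by omega)
  have hqlen : q < rem.length := by omega
  have hgq : rem.getD q (0, 0) = rem[q] := List.getD_eq_getElem _ _ hqlen
  have hqv : (rem[q]'hqlen).1 = (rem[p - 1]'hK).1 :=
    le_antisymm (fnrLex_fst_mono hsort hqK hK) (hqge q hqlen le_rfl)
  refine ⟨hqK, ?_⟩
  intro j hj hjp
  rw [hgq]
  have hjv : rem[j].1 ≤ (rem[p - 1]'hK).1 := fnrLex_fst_mono hsort (by omega) hK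
  have hjx : rem[j].1 < x := hbelow j hj hjp
  have hvx : (rem[p - 1]'hK).1 < x := hbelow (p - 1) hK (by omega)
  rcases lt_or_eq_of_le hjv with hlt | heq
  · left
    rw [abs_of_pos (by omega), abs_of_pos (by omega)]
    omega
  · right
    refine ⟨by rw [hqv, heq], ?_⟩
    have hqj : q ≤ j := by
      by_contra h
      exact absurd (hqlt j hj (by omega)) (by omega)
    rcases Nat.lt_or_ge q j with hqlt' | hge
    · have hlex := fnrLex_pairwise_getElem hsort hqlt' hj
      unfold fnrLex at hlex
      omega
    · have : q = j := by omega
      subst this; omega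

-- the "successor" candidate: when all positions j ≥ p hold values at least x,
-- position p itself is the best pair among those positions
theorem fnrSuccMin (rem : List (Int × Int)) (x : Int) (hsort : rem.Pairwise fnrLex)
    (p : Nat) (hplen : p < rem.length)
    (habove : ∀ j (hj : j < rem.length), p ≤ j → x ≤ rem[j].1) :
    ∀ j (hj : j < rem.length), p ≤ j → fnrKeyLe x (rem.getD p (0, 0)) rem[j] := by
  intro j hj hpj
  rw [List.getD_eq_getElem _ _ hplen]
  have h1 : (rem[p]'hplen).1 ≤ rem[j].1 := fnrLex_fst_mono hsort hpj hj
  have h2 : x ≤ (rem[p]'hplen).1 := habove p hplen le_rfl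
  have h3 : x ≤ rem[j].1 := habove j hj hpj
  rcases lt_or_eq_of_le h1 with hlt | heq
  · left
    rw [abs_of_nonpos (by omega), abs_of_nonpos (by omega)]
    omega
  · right
    refine ⟨by rw [heq], ?_⟩
    rcases Nat.lt_or_ge p j with hlt' | hge
    · have hlex := fnrLex_pairwise_getElem hsort hlt' hj
      unfold fnrLex at hlex
      omega
    · have : p = j := by omega
      subst this; omega

-- B's choice is in range and minimises (distance, index) over the whole pool
theorem fnrChoose_spec (rem : List (Int × Int)) (x : Int) (hne : rem ≠ [])
    (hsort : rem.Pairwise fnrLex) :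
    fnrChoose rem x < rem.length ∧
      ∀ j (hj : j < rem.length), fnrKeyLe x (rem.getD (fnrChoose rem x) (0, 0)) rem[j] := by
  have hlen0 : 0 < rem.length := List.length_pos_iff.mpr hne
  obtain ⟨hple, hplt, hpge⟩ := fnrBisect_spec rem x hsort
  by_cases h1 : fnrBisect rem x = rem.length
  · obtain ⟨hqK, hmin⟩ := fnrPredMin rem x hsort rem.length hlen0 le_rfl
      (fun j hj _ => hplt j hj (by omega))
    have hch : fnrChoose rem x = fnrBisect rem ((rem.getD (rem.length - 1) (0, 0)).1) := by
      simp only [fnrChoose]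
      rw [if_pos h1, h1]
    rw [hch]
    exact ⟨by omega, fun j hj => hmin j hj hj⟩
  · by_cases h2 : fnrBisect rem x = 0
    · have hch : fnrChoose rem x = 0 := by
        simp only [fnrChoose]
        rw [if_neg h1, if_pos h2]
      rw [hch]
      exact ⟨hlen0, fun j hj =>
        fnrSuccMin rem x hsort 0 hlen0 (fun j' hj' _ => hpge j' hj' (by omega)) j hj (by omega)⟩
    · have hp0 : 0 < fnrBisect rem x := Nat.pos_of_ne_zero h2
      have hplen : fnrBisect rem x < rem.length := lt_of_le_of_ne hple h1
      obtain ⟨hqK, hminpred⟩ := fnrPredMin rem x hsort (fnrBisect rem x) hp0 (le_of_lt hplen)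
        (fun j hj hjp => hplt j hj hjp)
      set p := fnrBisect rem x with hpdef
      set q := fnrBisect rem ((rem.getD (p - 1) (0, 0)).1) with hqdef
      have hqlen : q < rem.length := by omega
      have hminsucc := fnrSuccMin rem x hsort p hplen (fun j hj hpj => hpge j hj hpj)
      have hgq : rem.getD q (0, 0) = rem[q] := List.getD_eq_getElem _ _ hqlen
      have hgp : rem.getD p (0, 0) = rem[p] := List.getD_eq_getElem _ _ hplen
      have hprx : (rem[q]'hqlen).1 < x := hplt q hqlen (by omega)
      have hsx : x ≤ (rem[p]'hplen).1 := hpge p hplen le_rfl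
      have hch : fnrChoose rem x =
          if x - (rem.getD q (0, 0)).1 < (rem.getD p (0, 0)).1 - x ∨
             (x - (rem.getD q (0, 0)).1 = (rem.getD p (0, 0)).1 - x ∧
              (rem.getD q (0, 0)).2 < (rem.getD p (0, 0)).2) then q else p := by
        simp only [fnrChoose]
        rw [if_neg h1, if_neg h2]
      have habsq : |x - (rem.getD q (0, 0)).1| = x - (rem.getD q (0, 0)).1 := by
        rw [hgq]; exact abs_of_pos (by omega)
      have habsp : |x - (rem.getD p (0, 0)).1| = -(x - (rem.getD p (0, 0)).1) := by
        rw [hgp]; exact abs_of_nonpos (by omega)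
      by_cases hc : x - (rem.getD q (0, 0)).1 < (rem.getD p (0, 0)).1 - x ∨
          (x - (rem.getD q (0, 0)).1 = (rem.getD p (0, 0)).1 - x ∧
           (rem.getD q (0, 0)).2 < (rem.getD p (0, 0)).2)
      · rw [hch, if_pos hc]
        refine ⟨hqlen, ?_⟩
        intro j hj
        rcases Nat.lt_or_ge j p with hjp | hpj
        · exact hminpred j hj hjp
        · refine fnrKeyLe_trans ?_ (hminsucc j hj hpj)
          unfold fnrKeyLe
          rw [habsq, habsp]
          omega
      · rw [hch, if_neg hc]
        refine ⟨hplen, ?_⟩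
        intro j hj
        rcases Nat.lt_or_ge j p with hjp | hpj
        · refine fnrKeyLe_trans ?_ (hminpred j hj hjp)
          unfold fnrKeyLe
          rw [habsq, habsp]
          omega
        · exact hminsucc j hj hpj

-- stability of the value sort: pairs with strictly increasing indices sort to a
-- lexicographically strictly increasing list
theorem fnrInsertBy_lex (x : Int × Int) (acc : List (Int × Int))
    (hacc : acc.Pairwise fnrLex) (hidx : ∀ a ∈ acc, a.2 < x.2) :
    (PySem.List.insertBy (fun a b => decide (a.1 < b.1)) x acc).Pairwise fnrLex := by
  induction acc with
  | nil => simp [PySem.List.insertBy]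
  | cons y ys ih =>
    obtain ⟨hy, hys⟩ := List.pairwise_cons.mp hacc
    by_cases hxy : x.1 < y.1
    · rw [show PySem.List.insertBy (fun a b => decide (a.1 < b.1)) x (y :: ys) = x :: y :: ys by
        simp [PySem.List.insertBy, hxy]]
      refine List.pairwise_cons.mpr ⟨?_, hacc⟩
      intro z hz
      rcases List.mem_cons.mp hz with rfl | hzys
      · exact Or.inl hxy
      · have := hy z hzys
        unfold fnrLex at this ⊢
        omega
    · rw [show PySem.List.insertBy (fun a b => decide (a.1 < b.1)) x (y :: ys) =
          y :: PySem.List.insertBy (fun a b => decide (a.1 < b.1)) x ys by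
        simp [PySem.List.insertBy, hxy]]
      refine List.pairwise_cons.mpr
        ⟨?_, ih hys (fun a ha => hidx a (List.mem_cons_of_mem _ ha))⟩
      intro z hz
      rcases (PySem.List.mem_insertBy _ _ _ _).mp hz with rfl | hzys
      · have := hidx y (List.mem_cons_self ..)
        unfold fnrLex
        omega
      · exact hy z hzys

theorem fnrFoldInsert_lex (l : List (Int × Int)) :
    ∀ (acc : List (Int × Int)),
      acc.Pairwise fnrLex → (∀ a ∈ acc, ∀ y ∈ l, a.2 < y.2) →
      l.Pairwise (fun a b => a.2 < b.2) →
      (l.foldl (fun acc x => PySem.List.insertBy (fun a b => decide (a.1 < b.1)) x acc)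
        acc).Pairwise fnrLex := by
  induction l with
  | nil => intro acc h _ _; simpa using h
  | cons y l' ih =>
    intro acc hacc hcross hpw
    obtain ⟨hy, hl'⟩ := List.pairwise_cons.mp hpw
    rw [List.foldl_cons]
    apply ih
    · exact fnrInsertBy_lex y acc hacc (fun a ha => hcross a ha y (List.mem_cons_self ..))
    · intro a ha z hz
      rcases (PySem.List.mem_insertBy _ _ _ _).mp ha with rfl | haacc
      · exact hy z hz
      · exact hcross a haacc z (List.mem_cons_of_mem _ hz)
    · exact hl'

theorem fnrSorted_lex (l : List (Int × Int)) (h : l.Pairwise (fun a b => a.2 < b.2)) :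
    (PySem.List.sorted l (fun p => p.1) false).Pairwise fnrLex := by
  rw [PySem.List.sorted_eq_foldl_insertBy]
  exact fnrFoldInsert_lex l [] List.Pairwise.nil (by simp) h

-- A's inner loop, scanning pairs with strictly increasing indices, lands exactly on the
-- (distance, index)-minimal pair
theorem fnrFoldFrom (x : Int) (t : List (Int × Int)) :
    ∀ (c b : Int × Int),
      (b = c ∨ b ∈ t) →
      (∀ p, (p = c ∨ p ∈ t) → p ≠ b →
        |x - b.2| < |x - p.2| ∨ (|x - b.2| = |x - p.2| ∧ b.1 < p.1)) →
      (∀ p ∈ t, c.1 < p.1) →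
      t.Pairwise (fun a b => a.1 < b.1) →
      t.foldl (fnrScan x) (some c.2, some |x - c.2|, some c.1) =
        (some b.2, some |x - b.2|, some b.1) := by
  induction t with
  | nil =>
    intro c b hb _ _ _
    rcases hb with rfl | h
    · rfl
    · simp at h
  | cons q t' ih =>
    intro c b hb hmin hcfst hpw
    obtain ⟨hq, ht'⟩ := List.pairwise_cons.mp hpw
    rw [List.foldl_cons]
    have hstep : fnrScan x (some c.2, some |x - c.2|, some c.1) q =
        if |x - q.2| < |x - c.2| then (some q.2, some |x - q.2|, some q.1)
        else (some c.2, some |x - c.2|, some c.1) := rfl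
    by_cases hd : |x - q.2| < |x - c.2|
    · rw [hstep, if_pos hd]
      apply ih q b
      · rcases hb with rfl | hbt
        · exfalso
          by_cases hqb : q = b
          · subst hqb; omega
          · rcases hmin q (Or.inr (List.mem_cons_self ..)) hqb with h | h <;> omega
        · rcases List.mem_cons.mp hbt with rfl | hbt'
          · exact Or.inl rfl
          · exact Or.inr hbt'
      · intro p hp hpb
        rcases hp with rfl | hpt'
        · exact hmin p (Or.inr (List.mem_cons_self ..)) hpb
        · exact hmin p (Or.inr (List.mem_cons_of_mem _ hpt')) hpb
      · exact hq
      · exact ht'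
    · rw [hstep, if_neg hd]
      apply ih c b
      · rcases hb with rfl | hbt
        · exact Or.inl rfl
        · rcases List.mem_cons.mp hbt with rfl | hbt'
          · -- b is the head q: either it already equals c, or it would have to beat c
            -- strictly, contradicting ¬hd and the index order
            by_cases hcb : c = b
            · exact Or.inl hcb.symm
            · exfalso
              rcases hmin c (Or.inl rfl) hcb with h | h
              · exact hd h
              · have := hcfst b (List.mem_cons_self ..)
                omega
          · exact Or.inr hbt'
      · intro p hp hpb
        rcases hp with rfl | hpt'
        · exact hmin p (Or.inl rfl) hpb
        · exact hmin p (Or.inr (List.mem_cons_of_mem _ hpt')) hpb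
      · intro p hp
        exact hcfst p (List.mem_cons_of_mem _ hp)
      · exact ht'

theorem fnrInner_eq (x : Int) (lf : List (Int × Int)) (b : Int × Int)
    (hasc : lf.Pairwise (fun a b => a.1 < b.1))
    (hb : b ∈ lf)
    (hmin : ∀ p ∈ lf, p ≠ b →
      |x - b.2| < |x - p.2| ∨ (|x - b.2| = |x - p.2| ∧ b.1 < p.1)) :
    lf.foldl (fnrScan x) (none, none, none) = (some b.2, some |x - b.2|, some b.1) := by
  cases lf with
  | nil => simp at hb
  | cons h t =>
    obtain ⟨hh, ht⟩ := List.pairwise_cons.mp hasc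
    rw [List.foldl_cons]
    have hstep : fnrScan x (none, none, none) h = (some h.2, some |x - h.2|, some h.1) := rfl
    rw [hstep]
    apply fnrFoldFrom x t h b
    · rcases List.mem_cons.mp hb with rfl | hbt
      · exact Or.inl rfl
      · exact Or.inr hbt
    · intro p hp hpb
      rcases hp with rfl | hpt
      · exact hmin p (List.mem_cons_self ..) hpb
      · exact hmin p (List.mem_cons_of_mem _ hpt) hpb
    · exact hh
    · exact ht

theorem fnrMem_filter (array2 : List Int) (s : PySem.Set Int) (i v : Int) :
    (i, v) ∈ (PySem.List.enumerate array2).filter (fun iv => !(PySem.Set.contains s iv.1)) ↔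
      (i, v) ∈ PySem.List.enumerate array2 ∧ i ∉ s := by
  rw [List.mem_filter]
  simp [PySem.Set.contains]

theorem fnrEnumInj (array2 : List Int) {i v v' : Int}
    (h1 : (i, v) ∈ PySem.List.enumerate array2)
    (h2 : (i, v') ∈ PySem.List.enumerate array2) : v = v' := by
  rw [PySem.List.mem_enumerate_iff] at h1 h2
  obtain ⟨k, hk, e1⟩ := h1
  obtain ⟨k', hk', e2⟩ := h2
  obtain ⟨e1i, e1v⟩ := Prod.mk.injEq .. ▸ e1
  obtain ⟨e2i, e2v⟩ := Prod.mk.injEq .. ▸ e2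
  have hkk : k = k' := by
    have : (k : Int) = (k' : Int) := by omega
    exact_mod_cast this
  subst hkk
  rw [e1v, e2v]

theorem fnrMem_eraseIdx {l : List (Int × Int)} (hnd : l.Nodup) {pos : Nat}
    (hpos : pos < l.length) {a : Int × Int} :
    a ∈ l.eraseIdx pos ↔ a ∈ l ∧ a ≠ l[pos] := by
  rw [List.mem_eraseIdx_iff_getElem]
  constructor
  · rintro ⟨i, hi, hip, rfl⟩
    refine ⟨List.getElem_mem hi, fun he => hip ?_⟩
    exact (List.Nodup.getElem_inj_iff hnd).mp he
  · rintro ⟨hmem, hne⟩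
    obtain ⟨i, hi, rfl⟩ := List.mem_iff_getElem.mp hmem
    exact ⟨i, hi, fun he => hne (by subst he; rfl), rfl⟩

-- the outer loops agree step by step
theorem fnrOuter (array2 : List Int) (a1 : List Int) :
    ∀ (used : PySem.Set Int) (rem : List (Int × Int)) (acc : List Int),
      rem.Pairwise fnrLex →
      (∀ v i : Int, (v, i) ∈ rem ↔
        (i, v) ∈ (PySem.List.enumerate array2).filter
          (fun iv => !(PySem.Set.contains used iv.1))) →
      a1.length ≤ rem.length →
      (a1.foldl (fnrStepA array2) (used, acc)).2 = (a1.foldl fnrStepB (rem, acc)).2 := by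
  induction a1 with
  | nil => intro used rem acc _ _ _; rfl
  | cons x a1' ih =>
    intro used rem acc hsort hmem hlen
    have hlen' : a1'.length + 1 ≤ rem.length := by simpa using hlen
    have hne : rem ≠ [] := by
      intro h; subst h; simp at hlen'
    obtain ⟨hpos, hmin⟩ := fnrChoose_spec rem x hne hsort
    set pos := fnrChoose rem x with hposdef
    have hgd : rem.getD pos (0, 0) = rem[pos] := List.getD_eq_getElem _ _ hpos
    have hnd : rem.Nodup := by
      refine List.Pairwise.imp ?_ hsort
      intro a b hab
      rintro rfl
      unfold fnrLex at hab
      omega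
    have hbrem : (rem[pos]'hpos) ∈ rem := List.getElem_mem hpos
    have hblf : ((rem[pos]'hpos).2, (rem[pos]'hpos).1) ∈
        (PySem.List.enumerate array2).filter (fun iv => !(PySem.Set.contains used iv.1)) :=
      (hmem (rem[pos]'hpos).1 (rem[pos]'hpos).2).mp hbrem
    -- strict minimality of rem[pos] over the unused pairs, in (index, value) orientation
    have hminlf : ∀ p ∈ (PySem.List.enumerate array2).filter
        (fun iv => !(PySem.Set.contains used iv.1)),
        p ≠ ((rem[pos]'hpos).2, (rem[pos]'hpos).1) →
        |x - ((rem[pos]'hpos).2, (rem[pos]'hpos).1).2| < |x - p.2| ∨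
          (|x - ((rem[pos]'hpos).2, (rem[pos]'hpos).1).2| = |x - p.2| ∧
            ((rem[pos]'hpos).2, (rem[pos]'hpos).1).1 < p.1) := by
      intro p hp hpne
      have hpr : (p.2, p.1) ∈ rem := (hmem p.2 p.1).mpr hp
      obtain ⟨j, hj, hjeq⟩ := List.mem_iff_getElem.mp hpr
      have hk := hmin j hj
      rw [hgd, hjeq] at hk
      unfold fnrKeyLe at hk
      rcases hk with h | ⟨heq, hle⟩
      · exact Or.inl h
      · right
        refine ⟨heq, lt_of_le_of_ne hle ?_⟩
        intro hie
        apply hpne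
        have hpenum : (p.1, p.2) ∈ PySem.List.enumerate array2 :=
          (List.mem_filter.mp hp).1
        have hbenum : ((rem[pos]'hpos).2, (rem[pos]'hpos).1) ∈ PySem.List.enumerate array2 :=
          (List.mem_filter.mp hblf).1
        have hie' : (rem[pos]'hpos).2 = p.1 := hie
        rw [hie'] at hbenum
        have hveq : p.2 = (rem[pos]'hpos).1 := fnrEnumInj array2 hpenum hbenum
        exact Prod.ext_iff.mpr ⟨hie'.symm, hveq⟩
    -- reduce A's step
    have hstepA : fnrStepA array2 (used, acc) x =
        (PySem.Set.add used (rem[pos]'hpos).2, acc ++ [(rem[pos]'hpos).1]) := by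
      simp only [fnrStepA]
      rw [PySem.List.foldl_if_eq_foldl_filter (fun iv => !(PySem.Set.contains used iv.1))
        (fnrScan x)]
      rw [fnrInner_eq x _ ((rem[pos]'hpos).2, (rem[pos]'hpos).1)
        (List.Pairwise.sublist List.filter_sublist (PySem.List.pairwise_lt_enumerate array2 0))
        hblf hminlf]
      rfl
    have hstepB : fnrStepB (rem, acc) x =
        (rem.eraseIdx pos, acc ++ [(rem[pos]'hpos).1]) := by
      simp only [fnrStepB]
      rw [← hposdef, hgd]
    rw [List.foldl_cons, List.foldl_cons, hstepA, hstepB]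
    apply ih
    · exact List.Pairwise.sublist (List.eraseIdx_sublist rem pos) hsort
    · intro v i
      rw [fnrMem_eraseIdx hnd hpos, fnrMem_filter]
      have hbenum : ((rem[pos]'hpos).2, (rem[pos]'hpos).1) ∈ PySem.List.enumerate array2 :=
        (List.mem_filter.mp hblf).1
      constructor
      · rintro ⟨hm, hne2⟩
        have h0 := (fnrMem_filter array2 used i v).mp ((hmem v i).mp hm)
        refine ⟨h0.1, ?_⟩
        intro hiadd
        rcases (PySem.Set.mem_add used (rem[pos]'hpos).2 i).mp hiadd with hiu | hieq
        · exact h0.2 hiu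
        · subst hieq
          have hveq : v = (rem[pos]'hpos).1 := fnrEnumInj array2 h0.1 hbenum
          exact hne2 (by rw [hveq])
      · rintro ⟨henum, hnotin⟩
        have hiu : i ∉ used := fun h =>
          hnotin ((PySem.Set.mem_add used (rem[pos]'hpos).2 i).mpr (Or.inl h))
        have hine : i ≠ (rem[pos]'hpos).2 := fun h =>
          hnotin ((PySem.Set.mem_add used (rem[pos]'hpos).2 i).mpr (Or.inr h))
        refine ⟨(hmem v i).mpr ((fnrMem_filter array2 used i v).mpr ⟨henum, hiu⟩), ?_⟩
        intro he
        exact hine (by rw [← he])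
    · rw [List.length_eraseIdx]
      simp only [hpos, if_pos]
      omega

-- ===== VERDICT (by name: the statement is the Claim_ definition above) =====
theorem find_nearest_non_repeating_spec : Claim_equal_find_nearest_non_repeating := by
  intro array1 array2 _hdom hpre
  unfold Spec_find_nearest_non_repeating
  unfold find_nearest_non_repeating find_nearest_non_repeating_alt
  apply fnrOuter
  · exact fnrSorted_lex _
      (List.Pairwise.map _ (fun a b h => h) (PySem.List.pairwise_lt_enumerate array2 0))
  · intro v i
    rw [PySem.List.mem_sorted, fnrMem_filter]
    constructor
    · intro h
      obtain ⟨a, ha, hae⟩ := List.mem_map.mp h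
      obtain ⟨e1, e2⟩ := Prod.mk.injEq .. ▸ hae
      refine ⟨?_, by simp [PySem.Set.empty]⟩
      have : a = (i, v) := by
        have : a = (a.1, a.2) := rfl
        rw [this, e1, e2]
      rwa [← this]
    · rintro ⟨h, -⟩
      exact List.mem_map.mpr ⟨(i, v), h, rfl⟩
  · rw [PySem.List.length_sorted, List.length_map, PySem.List.length_enumerate]
    exact hpre
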